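-- pv_equiv track=rewrite | github.com/WelkinNi/ZeroED | feature.py | L2_str_agg
-- ===== SOURCE A (Python) =====
-- def L2_str_agg(s):
--     result = []
--     current_char_type = None
--     count = 0
--     for char in s:
--         if char.isdigit():
--             char_type = 'D'
--         elif char.isalpha():
--             char_type = 'L'
--         else:
--             char_type = 'S'
--         if char_type != current_char_type:
--             if current_char_type is not None:
--                 result.append(f'\\{current_char_type}-{count}')
--             current_char_type = char_type
--             count = 1
--         else:
--             count += 1
--     if current_char_type is not None:
--         result.append(f'\\{current_char_type}[{count}]')
--     return ''.join(result)
-- ===== SOURCE B (Python) =====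
-- def _ty(c):
--     return 'D' if c.isdigit() else 'L' if c.isalpha() else 'S'
--
-- def L2_str_agg(s):
--     # phase 1: group the string into (type, run-length) pairs
--     runs = []
--     i, n = 0, len(s)
--     while i < n:
--         t = _ty(s[i])
--         j = i + 1
--         while j < n and _ty(s[j]) == t:
--             j += 1
--         runs.append((t, j - i))
--         i = j
--     # phase 2: format — '-count' for every run but the last, '[count]' for the last
--     if not runs:
--         return ''
--     body = ''.join('\\%s-%d' % r for r in runs[:-1])
--     return body + '\\%s[%d]' % runs[-1]
-- ===== Notes on version B (the rewrite author's own statement) =====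
-- stated objective: alternative
-- what changed: B first groups the string into explicit (char-type, run-length) pairs with an index/inner-while scan, then formats the run list in a separate pass ('-n' for all but the last pair, '[n]' for the last), replacing A's single loop with inline current-type/count bookkeeping and emit-on-type-change.
import Mathlib
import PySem

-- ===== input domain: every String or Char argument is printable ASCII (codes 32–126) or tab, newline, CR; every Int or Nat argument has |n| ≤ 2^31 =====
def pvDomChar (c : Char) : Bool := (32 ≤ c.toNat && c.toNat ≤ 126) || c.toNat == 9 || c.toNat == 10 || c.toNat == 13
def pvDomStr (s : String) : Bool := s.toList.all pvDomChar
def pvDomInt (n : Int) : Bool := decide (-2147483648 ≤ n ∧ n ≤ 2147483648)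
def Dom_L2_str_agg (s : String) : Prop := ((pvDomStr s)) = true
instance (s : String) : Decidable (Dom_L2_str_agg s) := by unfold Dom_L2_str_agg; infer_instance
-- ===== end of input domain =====

-- B groups the string into (type, run-length) pairs first and formats them in a second
-- pass, replacing A's inline current-type/count bookkeeping (objective: alternative).

-- char type: 'D' for digits, 'L' for letters, 'S' otherwise (shared by both ports)
def pvTy (c : Char) : Char :=
  if PySem.Chars.isdigit c then 'D' else if PySem.Chars.isalpha c then 'L' else 'S'

-- f'\{t}-{n}'
def pvFmtMid (t : Char) (n : Nat) : String :=
  "\\" ++ String.singleton t ++ "-" ++ PySem.Int.toStr (n : Int)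

-- f'\{t}[{n}]'
def pvFmtLast (t : Char) (n : Nat) : String :=
  "\\" ++ String.singleton t ++ "[" ++ PySem.Int.toStr (n : Int) ++ "]"

-- ===== PORT A =====
-- the for-loop of A over (result, current_char_type, count)
def pvLoopA : List Char → List String → Option Char → Nat → List String × Option Char × Nat
  | [], res, cur, cnt => (res, cur, cnt)
  | c :: cs, res, cur, cnt =>
    let t := pvTy c
    if some t ≠ cur then
      pvLoopA cs (res ++ (match cur with | none => [] | some u => [pvFmtMid u cnt])) (some t) 1
    else
      pvLoopA cs res cur (cnt + 1)

def L2_str_agg (s : String) : String :=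
  match pvLoopA s.toList [] none 0 with
  | (res, none, _) => String.join res
  | (res, some u, cnt) => String.join (res ++ [pvFmtLast u cnt])

-- ===== PORT B =====
-- inner while loop: length of the run of characters of type t at the front
def pvCountRun (t : Char) : List Char → Nat
  | [] => 0
  | d :: ds => if pvTy d = t then 1 + pvCountRun t ds else 0

-- outer while loop: the (type, run-length) pairs of the string
def pvRuns : List Char → List (Char × Nat)
  | [] => []
  | c :: cs =>
    let t := pvTy c
    let k := pvCountRun t cs
    (t, 1 + k) :: pvRuns (cs.drop k)
termination_by cs => cs.length
decreasing_by simp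

def L2_str_agg_alt (s : String) : String :=
  let rs := pvRuns s.toList
  match rs.getLast? with
  | none => ""
  | some (t, n) => String.join (rs.dropLast.map (fun p => pvFmtMid p.1 p.2)) ++ pvFmtLast t n

-- ===== PRECONDITION & SPEC =====
def Spec_L2_str_agg (s : String) (out : String) : Prop := out = L2_str_agg_alt s
instance (s : String) (out : String) : Decidable (Spec_L2_str_agg s out) := by unfold Spec_L2_str_agg; infer_instance

-- ===== CLAIM (what is proved, stated in full; the proofs are below) =====
def Claim_equal_L2_str_agg : Prop := ∀ (s : String), Dom_L2_str_agg s → Spec_L2_str_agg s (L2_str_agg s)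

-- ===== LEMMAS AND PROOFS =====

-- canonical recursive renderer of a run list, used to connect the two ports
def pvRender : List (Char × Nat) → String
  | [] => ""
  | [p] => pvFmtLast p.1 p.2
  | p :: q :: rest => pvFmtMid p.1 p.2 ++ pvRender (q :: rest)

theorem foldl_append_shift (a : String) (xs : List String) :
    List.foldl (fun r s => r ++ s) a xs = a ++ String.join xs := by
  induction xs generalizing a with
  | nil => simp [String.join]
  | cons h t ih =>
    show List.foldl (fun r s => r ++ s) (a ++ h) t = a ++ String.join (h :: t)
    have hj : String.join (h :: t) = h ++ String.join t := by
      show List.foldl (fun r s => r ++ s) ("" ++ h) t = h ++ String.join t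
      rw [ih ("" ++ h)]; simp
    rw [ih (a ++ h), hj, String.append_assoc]

theorem join_cons (x : String) (xs : List String) :
    String.join (x :: xs) = x ++ String.join xs := by
  simp only [String.join, List.foldl]
  rw [foldl_append_shift]
  simp [String.join]

theorem join_append (xs : List String) (x : String) :
    String.join (xs ++ [x]) = String.join xs ++ x := by
  induction xs with
  | nil => simp [String.join]
  | cons h t ih => rw [List.cons_append, join_cons, ih, join_cons, String.append_assoc]

theorem pvRuns_nil : pvRuns [] = [] := by simp [pvRuns]

theorem pvRuns_cons (c : Char) (cs : List Char) :
    pvRuns (c :: cs)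
      = (pvTy c, 1 + pvCountRun (pvTy c) cs) :: pvRuns (cs.drop (pvCountRun (pvTy c) cs)) := by
  rw [pvRuns]

-- B's two-phase formatting equals the canonical renderer
theorem alt_render (rs : List (Char × Nat)) :
    (match rs.getLast? with
     | none => ""
     | some (t, n) => String.join (rs.dropLast.map (fun p => pvFmtMid p.1 p.2)) ++ pvFmtLast t n)
    = pvRender rs := by
  induction rs with
  | nil => rfl
  | cons p t ih =>
    cases t with
    | nil => simp [pvRender, String.join]
    | cons q rest =>
      simp only [List.getLast?_cons_cons] at *
      rw [pvRender]
      rw [← ih]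
      cases h : (q :: rest).getLast? with
      | none => simp at h
      | some pr =>
        cases pr
        have hd : (p :: q :: rest).dropLast = p :: (q :: rest).dropLast := by
          simp [List.dropLast]
        rw [hd, List.map_cons, join_cons]
        simp [String.append_assoc]

theorem alt_eq (s : String) : L2_str_agg_alt s = pvRender (pvRuns s.toList) := by
  unfold L2_str_agg_alt
  exact alt_render _

theorem render_cons (p : Char × Nat) (q : Char × Nat) (rest : List (Char × Nat)) :
    pvRender (p :: q :: rest) = pvFmtMid p.1 p.2 ++ pvRender (q :: rest) := rfl

-- A's loop with a pending run (t, n) renders the same as B's runs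
theorem loopA_pending (cs : List Char) : ∀ (res : List String) (t : Char) (n : Nat),
    (match pvLoopA cs res (some t) n with
     | (res', none, _) => String.join res'
     | (res', some u, cnt) => String.join (res' ++ [pvFmtLast u cnt]))
    = String.join res ++ pvRender ((t, n + pvCountRun t cs) :: pvRuns (cs.drop (pvCountRun t cs))) := by
  induction cs with
  | nil =>
    intro res t n
    simp only [pvLoopA, List.drop_nil, pvRuns_nil, pvCountRun, Nat.add_zero]
    rw [join_append]
    rfl
  | cons c cs ih =>
    intro res t n
    by_cases h : pvTy c = t
    · have hnn : ¬ (some (pvTy c) ≠ some t) := by simp [h]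
      simp only [pvLoopA]
      rw [if_neg hnn]
      rw [ih res t (n + 1)]
      have hc : pvCountRun t (c :: cs) = 1 + pvCountRun t cs := by
        simp [pvCountRun, h]
      rw [hc]
      have hdrop : (c :: cs).drop (1 + pvCountRun t cs) = cs.drop (pvCountRun t cs) := by
        rw [Nat.add_comm]; simp
      rw [hdrop]
      have : n + 1 + pvCountRun t cs = n + (1 + pvCountRun t cs) := by omega
      rw [this]
    · have hne : (some (pvTy c) ≠ some t) := by simp [h]
      simp only [pvLoopA]
      rw [if_pos hne]
      rw [ih (res ++ [pvFmtMid t n]) (pvTy c) 1]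
      have hc : pvCountRun t (c :: cs) = 0 := by simp [pvCountRun, h]
      rw [hc]
      simp only [List.drop_zero, Nat.add_zero]
      rw [pvRuns_cons c cs, render_cons, join_append, String.append_assoc]

-- ===== VERDICT =====
theorem L2_str_agg_spec : Claim_equal_L2_str_agg := by
  intro s _
  unfold Spec_L2_str_agg L2_str_agg
  rw [alt_eq]
  cases hcs : s.toList with
  | nil => simp [pvLoopA, pvRuns_nil, pvRender, String.join]
  | cons c cs =>
    have h1 : pvLoopA (c :: cs) [] none 0 = pvLoopA cs [] (some (pvTy c)) 1 := by
      simp [pvLoopA]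
    rw [h1, loopA_pending cs [] (pvTy c) 1, pvRuns_cons]
    simp [String.join]
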